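-- pv_equiv track=rewrite | github.com/pypi-data/pypi-mirror-315 | packages/runem/runem-0.5.0.tar.gz/runem-0.5.0/runem/run_command.py | parse_stdout
-- ===== SOURCE A (Python) =====
-- def parse_stdout(stdout: str, prefix: str) -> str:
--     """Prefixes each line of the output with a given label, except trailing new
--     lines."""
--     # Edge case: Return the prefix immediately for an empty string
--     if not stdout:
--         return prefix
--
--     # Split stdout into lines, noting if it ends with a newline
--     ends_with_newline = stdout.endswith("\n")
--     lines = stdout.split("\n")
--
--     # Apply prefix to all lines except the last if it's empty (due to a trailing newline)
--     modified_lines = [f"{prefix}{line}" for line in lines[:-1]] + (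
--         [lines[-1]]
--         if lines[-1] == "" and ends_with_newline
--         else [f"{prefix}{lines[-1]}"]
--     )
--
--     # Join the lines back together, appropriately handling the final newline
--     modified_stdout = "\n".join(modified_lines)
--     # if ends_with_newline:
--     #     modified_stdout += "\n"
--
--     return modified_stdout
-- ===== SOURCE B (Python) =====
-- def parse_stdout(stdout: str, prefix: str) -> str:
--     """Prefixes each line of the output with a given label, except trailing new
--     lines."""
--     if not stdout:
--         return prefix
--     result = prefix + stdout.replace("\n", "\n" + prefix)
--     if stdout.endswith("\n"):
--         result = result[: len(result) - len(prefix)]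
--     return result
-- ===== Notes on version B (the rewrite author's own statement) =====
-- stated objective: simpler
-- what changed: Replaced A's split-into-lines / per-line prefix comprehension / join pipeline by a single str.replace(' ', ' '+prefix) plus one trailing-prefix slice when stdout ends in a newline.
import Mathlib
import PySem

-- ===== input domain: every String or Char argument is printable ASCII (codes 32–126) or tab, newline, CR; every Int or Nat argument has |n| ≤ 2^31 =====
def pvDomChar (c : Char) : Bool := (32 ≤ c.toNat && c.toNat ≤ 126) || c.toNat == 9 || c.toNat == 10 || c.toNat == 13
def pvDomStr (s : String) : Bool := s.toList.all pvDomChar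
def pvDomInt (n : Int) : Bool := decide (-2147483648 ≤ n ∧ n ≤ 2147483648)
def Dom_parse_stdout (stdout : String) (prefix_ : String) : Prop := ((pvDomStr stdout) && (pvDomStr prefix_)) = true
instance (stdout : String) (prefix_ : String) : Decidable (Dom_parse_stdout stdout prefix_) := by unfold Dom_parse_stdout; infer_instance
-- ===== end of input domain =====

-- B replaces A's split / list comprehension / join pipeline by a single string
-- replace ('\n' -> '\n' + prefix) plus a trailing-prefix slice (objective: simpler).

-- ===== PORT A =====
def parse_stdout (stdout : String) (prefix_ : String) : String :=
  if stdout.toList = [] then prefix_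
  else
    let s := stdout.toList
    let p := prefix_.toList
    let endsWithNewline := PySem.Chars.endswith s ['\n']
    let lines := PySem.Chars.splitOn s ['\n']
    let lastLine := PySem.List.pyGetD lines (-1) []   -- lines[-1]; lines is never empty, so Python never raises here
    let modifiedLines :=
      (PySem.List.slice lines none (some (-1))).map (fun l => p ++ l)
        ++ (if lastLine = [] ∧ endsWithNewline then [lastLine] else [p ++ lastLine])
    String.ofList (PySem.Chars.join ['\n'] modifiedLines)

-- ===== PORT B =====
def parse_stdout_alt (stdout : String) (prefix_ : String) : String :=
  if stdout.toList = [] then prefix_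
  else
    let s := stdout.toList
    let p := prefix_.toList
    let result := p ++ PySem.Chars.replace s ['\n'] ('\n' :: p)
    if PySem.Chars.endswith s ['\n'] then
      String.ofList (PySem.List.slice result none
        (some ((PySem.Chars.len result : Int) - (PySem.Chars.len p : Int))))
    else
      String.ofList result

-- ===== PRECONDITION & SPEC =====
def Spec_parse_stdout (stdout : String) (prefix_ : String) (out : String) : Prop := out = parse_stdout_alt stdout prefix_
instance (stdout : String) (prefix_ : String) (out : String) : Decidable (Spec_parse_stdout stdout prefix_ out) := by unfold Spec_parse_stdout; infer_instance

-- ===== CLAIM (what is proved, stated in full; the proofs are below) =====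
def Claim_equal_parse_stdout : Prop := ∀ (stdout : String) (prefix_ : String), Dom_parse_stdout stdout prefix_ → Spec_parse_stdout stdout prefix_ (parse_stdout stdout prefix_)

-- ===== LEMMAS AND PROOFS =====

-- Structural model of s.split("\n")
def pvSplit : List Char → List (List Char)
  | [] => [[]]
  | c :: t => if c = '\n' then [] :: pvSplit t else (pvSplit t).modifyHead (c :: ·)

-- Structural model of s.replace("\n", "\n" + prefix)
def pvRep (p : List Char) : List Char → List Char
  | [] => []
  | c :: t => if c = '\n' then '\n' :: (p ++ pvRep p t) else c :: pvRep p t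

theorem pvSplit_ne_nil (l : List Char) : pvSplit l ≠ [] := by
  induction l with
  | nil => simp [pvSplit]
  | cons c t ih =>
    simp only [pvSplit]
    split_ifs
    · simp
    · cases h : pvSplit t with
      | nil => exact absurd h ih
      | cons a b => simp

theorem splitOn_go_eq (l : List Char) : ∀ (fuel : Nat), l.length ≤ fuel → ∀ (cur : List Char) (acc : List (List Char)),
    PySem.Chars.splitOn.go ['\n'] fuel l cur acc
      = acc.reverse ++ (pvSplit l).modifyHead (fun h => cur.reverse ++ h) := by
  induction l with
  | nil =>
    intro fuel _ cur acc
    cases fuel <;> simp [PySem.Chars.splitOn.go, pvSplit, List.modifyHead]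
  | cons c t ih =>
    intro fuel hf cur acc
    cases fuel with
    | zero => simp at hf
    | succ f =>
      by_cases hc : c = '\n'
      · subst hc
        have hpre : List.isPrefixOf ['\n'] ('\n' :: t) = true := by
          simp [List.isPrefixOf]
        simp only [PySem.Chars.splitOn.go, hpre, if_pos]
        rw [show List.drop ['\n'].length ('\n' :: t) = t from rfl]
        rw [ih f (by simpa using hf) [] (cur.reverse :: acc)]
        simp [pvSplit, List.modifyHead]
        cases h : pvSplit t <;> simp
      · have hpre : List.isPrefixOf ['\n'] (c :: t) = false := by
          simp [List.isPrefixOf]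
          exact fun h => (hc h.symm).elim
        simp only [PySem.Chars.splitOn.go, hpre]
        rw [if_neg (by simp)]
        rw [ih f (by simpa using hf) (c :: cur) acc]
        simp [pvSplit, hc]
        cases h : pvSplit t <;> simp [List.modifyHead]

theorem splitOn_eq_pvSplit (s : List Char) : PySem.Chars.splitOn s ['\n'] = pvSplit s := by
  unfold PySem.Chars.splitOn
  rw [splitOn_go_eq s (s.length + 1) (by omega) [] []]
  cases h : pvSplit s <;> simp [List.modifyHead]

theorem replace_go_eq (p : List Char) (l : List Char) : ∀ (fuel : Nat), l.length ≤ fuel → ∀ (acc : List Char),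
    PySem.Chars.replace.go ['\n'] ('\n' :: p) fuel l acc = acc.reverse ++ pvRep p l := by
  induction l with
  | nil =>
    intro fuel _ acc
    cases fuel <;> simp [PySem.Chars.replace.go, pvRep]
  | cons c t ih =>
    intro fuel hf acc
    cases fuel with
    | zero => simp at hf
    | succ f =>
      by_cases hc : c = '\n'
      · subst hc
        have hpre : List.isPrefixOf ['\n'] ('\n' :: t) = true := by
          simp [List.isPrefixOf]
        simp only [PySem.Chars.replace.go, hpre, if_pos]
        rw [show List.drop ['\n'].length ('\n' :: t) = t from rfl]
        rw [ih f (by simpa using hf)]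
        simp [pvRep]
      · have hpre : List.isPrefixOf ['\n'] (c :: t) = false := by
          simp [List.isPrefixOf]; exact fun h => (hc h.symm).elim
        simp only [PySem.Chars.replace.go]
        rw [if_neg (by simp [hpre])]
        rw [ih f (by simpa using hf)]
        simp [pvRep, hc]

theorem replace_eq_pvRep (p : List Char) (s : List Char) :
    PySem.Chars.replace s ['\n'] ('\n' :: p) = pvRep p s := by
  unfold PySem.Chars.replace
  rw [if_neg (by simp)]
  rw [replace_go_eq p s s.length le_rfl []]
  simp

theorem join_map_pvSplit (p : List Char) (l : List Char) :
    PySem.Chars.join ['\n'] ((pvSplit l).map (fun x => p ++ x)) = p ++ pvRep p l := by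
  induction l with
  | nil => simp [pvSplit, pvRep, PySem.Chars.join, List.intercalate]
  | cons c t ih =>
    obtain ⟨h, tl, hspl⟩ : ∃ h tl, pvSplit t = h :: tl := by
      cases hh : pvSplit t with
      | nil => exact absurd hh (pvSplit_ne_nil t)
      | cons a b => exact ⟨a, b, rfl⟩
    rw [hspl] at ih
    simp only [List.map_cons] at ih
    by_cases hc : c = '\n'
    · subst hc
      have e1 : pvSplit ('\n' :: t) = [] :: h :: tl := by simp [pvSplit, hspl]
      rw [e1]
      simp only [List.map_cons, List.append_nil]
      rw [PySem.Chars.join_cons_cons, ih]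
      simp [pvRep]
    · have e1 : pvSplit (c :: t) = (c :: h) :: tl := by
        simp [pvSplit, hc, hspl, List.modifyHead]
      rw [e1]
      cases tl with
      | nil =>
        simp only [List.map_cons, List.map_nil]
        simp only [List.map_nil] at ih
        rw [PySem.Chars.join_singleton] at ih ⊢
        have hh : h = pvRep p t := List.append_cancel_left ih
        simp [pvRep, hc, hh]
      | cons y ys =>
        simp only [List.map_cons] at ih ⊢
        rw [PySem.Chars.join_cons_cons] at ih ⊢
        have hh : h ++ '\n' :: PySem.Chars.join ['\n'] ((p ++ y) :: ys.map (fun x => p ++ x)) = pvRep p t := by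
          have h2 : p ++ (h ++ '\n' :: PySem.Chars.join ['\n'] ((p ++ y) :: ys.map (fun x => p ++ x))) = p ++ pvRep p t := by
            simpa using ih
          exact List.append_cancel_left h2
        simp only [pvRep, if_neg hc]
        rw [← hh]
        simp

theorem pvSplit_append_newline (l : List Char) : pvSplit (l ++ ['\n']) = pvSplit l ++ [[]] := by
  induction l with
  | nil => simp [pvSplit]
  | cons c t ih =>
    simp only [List.cons_append, pvSplit, ih]
    split_ifs
    · simp
    · obtain ⟨h, tl, hspl⟩ : ∃ h tl, pvSplit t = h :: tl := by
        cases hh : pvSplit t with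
        | nil => exact absurd hh (pvSplit_ne_nil t)
        | cons a b => exact ⟨a, b, rfl⟩
      rw [hspl]
      simp [List.modifyHead]

theorem pvRep_append_newline (p : List Char) (l : List Char) :
    pvRep p (l ++ ['\n']) = pvRep p l ++ '\n' :: p := by
  induction l with
  | nil => simp [pvRep]
  | cons c t ih =>
    simp only [List.cons_append, pvRep, ih]
    split_ifs <;> simp

theorem join_append_nil (xs : List (List Char)) (hne : xs ≠ []) :
    PySem.Chars.join ['\n'] (xs ++ [[]]) = PySem.Chars.join ['\n'] xs ++ ['\n'] := by
  induction xs with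
  | nil => exact absurd rfl hne
  | cons x t ih =>
    cases t with
    | nil =>
      rw [PySem.Chars.join_singleton]
      simp only [List.cons_append, List.nil_append]
      rw [PySem.Chars.join_cons_cons, PySem.Chars.join_singleton]
      simp
    | cons y ys =>
      rw [PySem.Chars.join_cons_cons]
      simp only [List.cons_append]
      rw [PySem.Chars.join_cons_cons]
      rw [show y :: (ys ++ [[]]) = (y :: ys) ++ [[]] from rfl, ih (by simp)]
      simp

theorem slice_to_neg_one_eq_dropLast {α : Type} (xs : List α) :
    PySem.List.slice xs none (some (-1)) = xs.dropLast := by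
  simp only [PySem.List.slice, PySem.List.clampIdx]
  cases xs with
  | nil => simp
  | cons x t =>
    have h1 : ((-1 : Int) < 0) := by omega
    rw [if_pos h1]
    split_ifs with h2
    · exfalso; simp at h2; omega
    · have : ((x :: t).length : Int) + (-1) = (t.length : Int) := by
        simp only [List.length_cons]; push_cast; omega
      rw [this]
      simp [List.dropLast_eq_take]

theorem slice_drop_suffix (pre suf : List Char) :
    PySem.List.slice (pre ++ suf) none (some (((pre ++ suf).length : Int) - (suf.length : Int))) = pre := by
  simp only [PySem.List.slice, PySem.List.clampIdx]
  have hk : ((pre ++ suf).length : Int) - (suf.length : Int) = (pre.length : Int) := by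
    push_cast [List.length_append]
    omega
  rw [hk]
  rw [if_neg (by omega)]
  simp

theorem parse_stdout_eq (stdout prefix_ : String) :
    parse_stdout stdout prefix_ = parse_stdout_alt stdout prefix_ := by
  unfold parse_stdout parse_stdout_alt
  by_cases hnil : stdout.toList = []
  · simp [hnil]
  · rw [if_neg hnil, if_neg hnil]
    simp only []
    set s := stdout.toList with hs
    set p := prefix_.toList with hp
    rw [replace_eq_pvRep, splitOn_eq_pvSplit, slice_to_neg_one_eq_dropLast]
    by_cases hend : PySem.Chars.endswith s ['\n'] = true
    · -- s ends with '\n'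
      rw [hend]
      obtain ⟨l', hl'⟩ : ∃ l', s = l' ++ ['\n'] := by
        have := (PySem.Chars.endswith_iff s ['\n']).mp hend
        obtain ⟨l', hl'⟩ := this
        exact ⟨l', hl'.symm⟩
      rw [if_pos rfl]
      have hsplit : pvSplit s = pvSplit l' ++ [[]] := by rw [hl', pvSplit_append_newline]
      have hlast : PySem.List.pyGetD (pvSplit s) (-1) [] = [] := by
        rw [hsplit]; exact PySem.List.pyGetD_neg_one_append_singleton _ _ _
      rw [hlast]
      rw [if_pos ⟨rfl, rfl⟩]
      have hdrop : (pvSplit s).dropLast = pvSplit l' := by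
        rw [hsplit, List.dropLast_concat]
      rw [hdrop]
      have hjoin : PySem.Chars.join ['\n'] ((pvSplit l').map (fun l => p ++ l) ++ [[]])
          = (p ++ pvRep p l') ++ ['\n'] := by
        rw [join_append_nil _ (by simp [pvSplit_ne_nil l'])]
        rw [join_map_pvSplit]
      rw [hjoin]
      have hrep : pvRep p s = pvRep p l' ++ '\n' :: p := by
        rw [hl', pvRep_append_newline]
      rw [hrep]
      have hpre : p ++ (pvRep p l' ++ '\n' :: p) = ((p ++ pvRep p l' ++ ['\n']) ++ p) := by simp
      rw [show PySem.Chars.len (p ++ (pvRep p l' ++ '\n' :: p)) = (p ++ (pvRep p l' ++ '\n' :: p)).length from PySem.Chars.len_eq _,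
          show PySem.Chars.len p = p.length from PySem.Chars.len_eq _]
      rw [hpre]
      rw [slice_drop_suffix (p ++ pvRep p l' ++ ['\n']) p]
    · -- s does not end with '\n'
      rw [Bool.not_eq_true] at hend
      rw [hend]
      rw [if_neg (by simp)]
      have hne := pvSplit_ne_nil s
      have hlast : PySem.List.pyGetD (pvSplit s) (-1) [] = (pvSplit s).getLast hne :=
        PySem.List.pyGetD_neg_one (pvSplit s) [] hne
      rw [hlast]
      have : (pvSplit s).dropLast.map (fun l => p ++ l) ++ [p ++ (pvSplit s).getLast hne]
          = (pvSplit s).map (fun l => p ++ l) := by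
        conv_rhs => rw [← List.dropLast_append_getLast hne]
        simp
      rw [this, join_map_pvSplit]
      simp

-- ===== VERDICT (by name: the statement is the Claim_ definition above) =====
theorem parse_stdout_spec : Claim_equal_parse_stdout := by
  intro stdout prefix_ _
  unfold Spec_parse_stdout
  exact parse_stdout_eq stdout prefix_
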